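-- pv_equiv track=rewrite | github.com/Red-Bush-Analytics/Datamine-FIle-Sorter | datamine_dm_legacy_reader_working.py | logical_columns
-- ===== SOURCE A (Python) =====
-- from typing import Dict, Iterable, List
--
-- def norm_field_type(ftype: str) -> str:
--     if ftype is None:
--         return ""
--     t = "".join(ch for ch in str(ftype).upper() if ch.isalpha())
--     return t[:1]
--
-- def logical_columns(descriptors: List[Dict]) -> List[str]:
--     cols = []
--     i = 0
--     while i < len(descriptors):
--         d = descriptors[i]
--         name = d["name"]
--         ftype = norm_field_type(d.get("type", ""))
--
--         cols.append(d["name"])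
--
--         if ftype == "N":
--             i += 1
--         elif ftype == "A":
--             j = i + 1
--             while (
--                 j < len(descriptors)
--                 and norm_field_type(descriptors[j].get("type", "")) == "A"
--                 and descriptors[j]["name"] == name
--             ):
--                 j += 1
--             i = j
--         else:
--             i += 1
--     return cols
-- ===== SOURCE B (Python) =====
-- def norm_field_type(ftype: str) -> str:
--     if ftype is None:
--         return ""
--     t = "".join(ch for ch in str(ftype).upper() if ch.isalpha())
--     return t[:1]
--
-- def logical_columns(descriptors):
--     cols = []
--     active = None  # name of the current run of consecutive 'A' descriptors, else None
--     for d in descriptors: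
--         name = d["name"]
--         t = norm_field_type(d.get("type", ""))
--         if t == "A" and active == name:
--             continue  # consecutive same-name alpha descriptor: collapsed
--         cols.append(name)
--         active = name if t == "A" else None
--     return cols
-- ===== Notes on version B (the rewrite author's own statement) =====
-- stated objective: simpler
-- what changed: Replaces the index-jumping outer while with a nested skip-ahead while by a single flat for-loop that keeps one piece of state (the name of the active run of 'A' descriptors) and skips a descriptor exactly when it continues that run.
import Mathlib
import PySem

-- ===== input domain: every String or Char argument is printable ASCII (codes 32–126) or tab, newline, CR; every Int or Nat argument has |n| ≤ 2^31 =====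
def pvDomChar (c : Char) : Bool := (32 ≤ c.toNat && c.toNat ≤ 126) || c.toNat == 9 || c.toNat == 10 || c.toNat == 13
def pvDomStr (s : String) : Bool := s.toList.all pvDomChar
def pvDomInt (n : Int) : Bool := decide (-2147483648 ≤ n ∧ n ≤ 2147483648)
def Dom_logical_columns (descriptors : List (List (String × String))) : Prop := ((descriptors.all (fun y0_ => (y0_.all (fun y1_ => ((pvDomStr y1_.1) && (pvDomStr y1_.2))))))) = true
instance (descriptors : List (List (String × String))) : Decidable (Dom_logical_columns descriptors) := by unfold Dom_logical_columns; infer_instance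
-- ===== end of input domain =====

-- B replaces A's index-jumping outer while + nested skip-ahead while by one flat
-- forward pass keeping the name of the active run of 'A' descriptors (objective: simpler).


-- ===== PORT A =====
-- norm_field_type: ftype is always a str here, so the 'is None' branch never fires.
def norm_field_type (ftype : String) : String :=
  let t : List Char := (PySem.Chars.upper ftype.toList).filter PySem.Chars.isalpha
  String.ofList (PySem.List.slice t none (some 1))    -- t[:1]

-- d["name"]: KeyError when absent; Pre_ excludes that, the port then defaults to "".
def pyName (d : List (String × String)) : String :=
  ((PySem.Dict.mk d).get? "name").getD ""

def pyType (d : List (String × String)) : String :=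
  norm_field_type ((PySem.Dict.mk d).getD "type" "")

-- inner while of A: advance j over consecutive 'A' descriptors with the same name
def lcA_inner (descs : List (List (String × String))) (name : String) (j : Nat) : Nat :=
  if h : j < descs.length then
    if pyType descs[j] == "A" && (pyName descs[j] == name) then
      lcA_inner descs name (j + 1)
    else j
  else j
termination_by descs.length - j

theorem lcA_inner_ge (descs : List (List (String × String))) (name : String) (j : Nat) :
    j ≤ lcA_inner descs name j := by
  unfold lcA_inner
  split
  · split
    · have := lcA_inner_ge descs name (j + 1); omega
    · exact le_refl _
  · exact le_refl _
termination_by descs.length - j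

-- outer while of A
def lcA_loop (descs : List (List (String × String))) (i : Nat) (cols : List String) :
    List String :=
  if h : i < descs.length then
    let d := descs[i]
    let name := pyName d
    let ftype := pyType d
    let cols2 := cols ++ [name]
    if ftype == "N" then lcA_loop descs (i + 1) cols2
    else if ftype == "A" then lcA_loop descs (lcA_inner descs name (i + 1)) cols2
    else lcA_loop descs (i + 1) cols2
  else cols
termination_by descs.length - i
decreasing_by
  · omega
  · have := lcA_inner_ge descs (pyName descs[i]) (i + 1); omega
  · omega

def logical_columns (descriptors : List (List (String × String))) : List String :=
  lcA_loop descriptors 0 []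

-- ===== PORT B =====
-- one flat pass; 'active' is the name of the current run of 'A' descriptors
def lcB_loop (active : Option String) (cols : List String) :
    List (List (String × String)) → List String
  | [] => cols
  | d :: rest =>
    let name := pyName d
    let t := pyType d
    if t == "A" && active == some name then lcB_loop active cols rest
    else lcB_loop (if t == "A" then some name else none) (cols ++ [name]) rest

def logical_columns_alt (descriptors : List (List (String × String))) : List String :=
  lcB_loop none [] descriptors

-- ===== PRECONDITION & SPEC =====
-- Pre_ excludes descriptor dicts lacking the key "name", on which the Python (both A and B) raises KeyError.
def Pre_logical_columns (descriptors : List (List (String × String))) : Prop :=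
  ∀ d ∈ descriptors, ((PySem.Dict.mk d).get? "name").isSome
instance (descriptors : List (List (String × String))) : Decidable (Pre_logical_columns descriptors) := by unfold Pre_logical_columns; infer_instance

def pvWitness_logical_columns : (List (List (String × String))) :=
  [[("name", "X"), ("type", "A")], [("name", "X"), ("type", "A")], [("name", "Y"), ("type", "N")]]

def Spec_logical_columns (descriptors : List (List (String × String))) (out : List String) : Prop := out = logical_columns_alt descriptors
instance (descriptors : List (List (String × String))) (out : List String) : Decidable (Spec_logical_columns descriptors out) := by unfold Spec_logical_columns; infer_instance

-- ===== CLAIM (what is proved, stated in full; the proofs are below) =====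
def Claim_equal_logical_columns : Prop := ∀ (descriptors : List (List (String × String))), Dom_logical_columns descriptors → Pre_logical_columns descriptors → Spec_logical_columns descriptors (logical_columns descriptors)

-- ===== LEMMAS AND PROOFS =====

-- B skips exactly the descriptors A's inner while jumps over
theorem lcB_skip (descs : List (List (String × String))) (name : String) :
    ∀ n j cols, descs.length - j ≤ n →
      lcB_loop (some name) cols (descs.drop j)
        = lcB_loop (some name) cols (descs.drop (lcA_inner descs name j)) := by
  intro n
  induction n with
  | zero =>
    intro j cols hn
    unfold lcA_inner
    have hj : ¬ j < descs.length := by omega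
    simp [hj]
  | succ n ih =>
    intro j cols hn
    unfold lcA_inner
    by_cases hj : j < descs.length
    · simp only [hj, dite_true]
      by_cases hc : (pyType descs[j] == "A" && (pyName descs[j] == name)) = true
      · simp only [hc, if_true]
        have hdrop : descs.drop j = descs[j] :: descs.drop (j + 1) :=
          List.drop_eq_getElem_cons hj
        rw [hdrop]
        have hA : (pyType descs[j] == "A") = true := by
          simp only [Bool.and_eq_true] at hc; exact hc.1
        have hname : pyName descs[j] = name := by
          simp only [Bool.and_eq_true, beq_iff_eq] at hc; exact hc.2
        rw [lcB_loop]
        simp only [hname, hA, BEq.rfl, Bool.and_self, if_true]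
        exact ih (j + 1) cols (by omega)
      · simp [hc]
    · simp [hj]

-- where A's inner while stops (inside the list), its condition fails
theorem lcA_inner_stop_fuel (descs : List (List (String × String))) (name : String) :
    ∀ n j, descs.length - j ≤ n →
      ∀ _ : lcA_inner descs name j < descs.length,
      (pyType descs[lcA_inner descs name j] == "A"
        && (pyName descs[lcA_inner descs name j] == name)) = false := by
  intro n
  induction n with
  | zero =>
    intro j hn h
    have hj : ¬ j < descs.length := by omega
    have heq : lcA_inner descs name j = j := by rw [lcA_inner]; simp [hj]
    rw [heq] at h; omega
  | succ n ih =>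
    intro j hn h
    by_cases hj : j < descs.length
    · by_cases hc : (pyType descs[j] == "A" && (pyName descs[j] == name)) = true
      · have heq : lcA_inner descs name j = lcA_inner descs name (j + 1) := by
          rw [lcA_inner]; simp [hj, hc]
        simp only [heq] at h ⊢
        exact ih (j + 1) (by omega) h
      · have heq : lcA_inner descs name j = j := by rw [lcA_inner]; simp [hj, hc]
        simp only [heq] at h ⊢
        exact Bool.eq_false_iff.mpr (fun hh => hc hh)
    · have heq : lcA_inner descs name j = j := by rw [lcA_inner]; simp [hj]
      rw [heq] at h; omega

theorem lcA_inner_stop (descs : List (List (String × String))) (name : String) (j : Nat)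
    (h : lcA_inner descs name j < descs.length) :
    (pyType descs[lcA_inner descs name j] == "A"
      && (pyName descs[lcA_inner descs name j] == name)) = false :=
  lcA_inner_stop_fuel descs name (descs.length - j) j (le_refl _) h

-- the loop invariant relating A's position i to B's 'active' state
theorem lc_main (descs : List (List (String × String))) :
    ∀ n i cols active, descs.length - i ≤ n →
      (∀ h : i < descs.length,
        (pyType descs[i] == "A" && active == some (pyName descs[i])) = false) →
      lcA_loop descs i cols = lcB_loop active cols (descs.drop i) := by
  intro n
  induction n with
  | zero =>
    intro i cols active hn _
    have hi : ¬ i < descs.length := by omega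
    unfold lcA_loop
    rw [List.drop_of_length_le (by omega)]
    simp [hi, lcB_loop]
  | succ n ih =>
    intro i cols active hn hact
    by_cases hi : i < descs.length
    · have hdrop : descs.drop i = descs[i] :: descs.drop (i + 1) :=
        List.drop_eq_getElem_cons hi
      unfold lcA_loop
      simp only [hi, dite_true]
      rw [hdrop, lcB_loop]
      simp only [hact hi, Bool.false_eq_true, if_false]
      by_cases hN : (pyType descs[i] == "N") = true
      · have hnotA : (pyType descs[i] == "A") = false := by
          simp only [beq_iff_eq] at hN ⊢; simp [hN]
        simp only [hN, if_true, hnotA, Bool.false_eq_true, if_false]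
        exact ih (i + 1) _ none (by omega) (fun h => by simp)
      · simp only [hN, Bool.false_eq_true, if_false]
        by_cases hA : (pyType descs[i] == "A") = true
        · simp only [hA, if_true]
          rw [ih (lcA_inner descs (pyName descs[i]) (i + 1)) _ (some (pyName descs[i]))
                (by have := lcA_inner_ge descs (pyName descs[i]) (i + 1); omega) ?_]
          · exact (lcB_skip descs (pyName descs[i]) (descs.length - (i+1)) (i + 1) _ (le_refl _)).symm
          · intro h
            -- lcA_inner stopped: the condition fails at its result
            have hstop : (pyType descs[lcA_inner descs (pyName descs[i]) (i+1)] == "A"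
                && (pyName descs[lcA_inner descs (pyName descs[i]) (i+1)] == pyName descs[i])) = false := by
              have := lcA_inner_stop descs (pyName descs[i]) (i + 1) h
              exact this
            simp only [Bool.and_eq_false_iff] at hstop ⊢
            rcases hstop with h1 | h2
            · exact Or.inl h1
            · right
              have h2' := h2
              simp only [beq_eq_false_iff_ne, Ne, Option.some.injEq] at h2' ⊢
              exact fun hh => h2' hh.symm
        · simp only [hA, Bool.false_eq_true, if_false]
          exact ih (i + 1) _ none (by omega) (fun h => by simp)
    · have h1 : ∀ h : i < descs.length, False := fun h => hi h
      unfold lcA_loop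
      rw [List.drop_of_length_le (by omega)]
      simp [hi, lcB_loop]

-- ===== VERDICT (by name: the statement is the Claim_ definition above) =====
theorem logical_columns_spec : Claim_equal_logical_columns := by
  intro descs _ _
  unfold Spec_logical_columns logical_columns logical_columns_alt
  have := lc_main descs descs.length 0 [] none (by omega) (fun h => by simp)
  simpa using this
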